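-- pv_equiv track=rewrite | github.com/chho33/Simple-TCP | code/utils.py | packet_8_to_16
-- ===== SOURCE A (Python) =====
-- def packet_8_to_16(packet):
--     packet_16 = []
--     for i in range(0, len(packet), 2):
--         pack2 = packet[i:i+2]
--         if len(pack2) < 2:
--             packet_16.append(pack2[0]<<8)
--         else:
--             packet_16.append(pack2[0]<<8 | pack2[1])
--     return packet_16
-- ===== SOURCE B (Python) =====
-- def packet_8_to_16(packet):
--     # One pass over the elements with a pending high byte, no index slicing.
--     packet_16 = []
--     high = None
--     for x in packet:
--         if high is None:
--             high = x
--         else: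
--             packet_16.append(high << 8 | x)
--             high = None
--     if high is not None:
--         packet_16.append(high << 8)
--     return packet_16
-- ===== Notes on version B (the rewrite author's own statement) =====
-- stated objective: simpler
-- what changed: Replaces the index-stepped range(0,len,2) loop with per-pair slicing and a length test by a single element-wise pass holding a pending high byte, combining each pair as it completes (tail high byte flushed as h<<8).
import Mathlib
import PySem

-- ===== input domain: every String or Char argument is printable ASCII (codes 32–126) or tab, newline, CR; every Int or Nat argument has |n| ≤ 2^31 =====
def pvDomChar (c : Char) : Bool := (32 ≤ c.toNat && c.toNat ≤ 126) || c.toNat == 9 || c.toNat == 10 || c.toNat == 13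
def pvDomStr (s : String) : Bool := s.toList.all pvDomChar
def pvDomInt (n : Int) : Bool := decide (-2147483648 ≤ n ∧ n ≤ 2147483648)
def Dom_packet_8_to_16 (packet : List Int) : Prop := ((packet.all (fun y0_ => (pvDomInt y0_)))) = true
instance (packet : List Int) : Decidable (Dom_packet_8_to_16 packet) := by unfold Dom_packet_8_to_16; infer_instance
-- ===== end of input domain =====

-- B replaces A's index-stepped pair-slicing loop by a single element-wise pass with a pending high byte (alternative decomposition, not claimed faster).

-- ===== PORT A =====
def packet_8_to_16 (packet : List Int) : List Int :=
  (PySem.List.pyRange 0 packet.length 2).foldl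
    (fun packet_16 i =>
      let pack2 := PySem.List.slice packet (some i) (some (i + 2))
      if pack2.length < 2 then
        packet_16 ++ [(PySem.List.pyGetD pack2 0 0) <<< 8]
      else
        packet_16 ++ [PySem.Int.bor ((PySem.List.pyGetD pack2 0 0) <<< 8) (PySem.List.pyGetD pack2 1 0)])
    []

-- ===== PORT B =====
def packet_8_to_16_alt (packet : List Int) : List Int :=
  let st := packet.foldl
    (fun (s : List Int × Option Int) x =>
      match s.2 with
      | none => (s.1, some x)
      | some h => (s.1 ++ [PySem.Int.bor (h <<< 8) x], none))
    ([], none)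
  match st.2 with
  | none => st.1
  | some h => st.1 ++ [h <<< 8]

-- ===== PRECONDITION & SPEC =====
def Spec_packet_8_to_16 (packet : List Int) (out : List Int) : Prop := out = packet_8_to_16_alt packet
instance (packet : List Int) (out : List Int) : Decidable (Spec_packet_8_to_16 packet out) := by unfold Spec_packet_8_to_16; infer_instance

-- ===== CLAIM (what is proved, stated in full; the proofs are below) =====
def Claim_equal_packet_8_to_16 : Prop := ∀ (packet : List Int), Dom_packet_8_to_16 packet → Spec_packet_8_to_16 packet (packet_8_to_16 packet)

-- ===== LEMMAS AND PROOFS =====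

/-- Reference pairing: the common value of both ports. -/
def pvPairs : List Int → List Int
  | [] => []
  | [a] => [a <<< 8]
  | a :: b :: t => PySem.Int.bor (a <<< 8) b :: pvPairs t

/-- A's per-index contribution, as a one-element list. -/
def pvStepA (packet : List Int) (i : Int) : List Int :=
  let pack2 := PySem.List.slice packet (some i) (some (i + 2))
  if pack2.length < 2 then
    [(PySem.List.pyGetD pack2 0 0) <<< 8]
  else
    [PySem.Int.bor ((PySem.List.pyGetD pack2 0 0) <<< 8) (PySem.List.pyGetD pack2 1 0)]

lemma pyRange_two_nil (a b : Int) (h : b ≤ a) : PySem.List.pyRange a b 2 = [] := by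
  rw [PySem.List.pyRange_of_pos a b (by norm_num)]
  simp [if_neg (by omega : ¬ a < b)]

lemma pyRange_two_cons (a b : Int) (h : a < b) :
    PySem.List.pyRange a b 2 = a :: PySem.List.pyRange (a + 2) b 2 := by
  rw [PySem.List.pyRange_of_pos a b (by norm_num), PySem.List.pyRange_of_pos (a+2) b (by norm_num)]
  rw [if_pos h]
  by_cases h2 : a + 2 < b
  · rw [if_pos h2]
    have hc : ((b - a + 2 - 1) / 2).toNat = ((b - (a + 2) + 2 - 1) / 2).toNat + 1 := by omega
    rw [hc, List.range_succ_eq_map]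
    simp only [List.map_cons, List.map_map, Nat.cast_zero, mul_zero, add_zero, Function.comp_def,
      Nat.succ_eq_add_one]
    exact congrArg (a :: ·) (List.map_congr_left fun k _ => by push_cast; ring)
  · rw [if_neg h2]
    have hc : ((b - a + 2 - 1) / 2).toNat = 1 := by omega
    rw [hc]
    simp

lemma A_flat (t : List Int) : ∀ (xs : List Int) (i : Nat), t = xs.drop i →
    (PySem.List.pyRange i xs.length 2).flatMap (pvStepA xs) = pvPairs t := by
  induction t using pvPairs.induct with
  | case1 =>
    intro xs i h
    rw [pyRange_two_nil _ _ (by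
      have := List.drop_eq_nil_iff.mp h.symm
      exact_mod_cast by omega)]
    rfl
  | case2 a =>
    intro xs i h
    have hlen : xs.length = i + 1 := by
      have h1 := congrArg List.length h
      simp [List.length_drop] at h1
      omega
    rw [pyRange_two_cons _ _ (by exact_mod_cast by omega)]
    rw [pyRange_two_nil _ _ (by exact_mod_cast by omega)]
    simp only [List.flatMap_cons, List.flatMap_nil, List.append_nil]
    have hs : PySem.List.slice xs (some (i : Int)) (some ((i : Int) + 2)) = [a] := by
      have : ((i : Int) + 2) = ((i + 2 : Nat) : Int) := by push_cast; ring
      rw [this, PySem.List.slice_toNat xs (by positivity) (by positivity)]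
      simp only [Int.toNat_natCast]
      rw [← h, show i + 2 - i = 2 by omega]
      rfl
    simp [pvStepA, hs, pvPairs, PySem.List.pyGetD]
  | case3 a b t ih =>
    intro xs i h
    have hlen : i + 2 ≤ xs.length := by
      have h1 := congrArg List.length h
      simp [List.length_drop] at h1
      omega
    rw [pyRange_two_cons _ _ (by exact_mod_cast by omega)]
    simp only [List.flatMap_cons]
    have hs : PySem.List.slice xs (some (i : Int)) (some ((i : Int) + 2)) = [a, b] := by
      have : ((i : Int) + 2) = ((i + 2 : Nat) : Int) := by push_cast; ring
      rw [this, PySem.List.slice_toNat xs (by positivity) (by positivity)]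
      simp only [Int.toNat_natCast]
      rw [← h, show i + 2 - i = 2 by omega]
      rfl
    have ht : t = xs.drop (i + 2) := by
      have := congrArg (List.drop 2) h
      simpa using this
    have hcast : ((i : Int) + 2) = ((i + 2 : Nat) : Int) := by push_cast; ring
    rw [hcast, ih xs (i + 2) ht]
    simp [pvStepA, hs, pvPairs, PySem.List.pyGetD]

lemma A_eq_pairs (packet : List Int) : packet_8_to_16 packet = pvPairs packet := by
  unfold packet_8_to_16
  have hf : (fun (packet_16 : List Int) (i : Int) =>
      let pack2 := PySem.List.slice packet (some i) (some (i + 2))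
      if pack2.length < 2 then
        packet_16 ++ [(PySem.List.pyGetD pack2 0 0) <<< 8]
      else
        packet_16 ++ [PySem.Int.bor ((PySem.List.pyGetD pack2 0 0) <<< 8) (PySem.List.pyGetD pack2 1 0)])
      = (fun acc i => acc ++ pvStepA packet i) := by
    funext acc i
    simp only [pvStepA]
    split <;> rfl
  rw [hf, PySem.List.foldl_append_eq_flatMap]
  simpa using A_flat packet packet 0 rfl

lemma B_loop (t : List Int) : ∀ (acc : List Int),
    (fun st : List Int × Option Int =>
      match st.2 with
      | none => st.1
      | some h => st.1 ++ [h <<< 8])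
    (t.foldl
      (fun (s : List Int × Option Int) x =>
        match s.2 with
        | none => (s.1, some x)
        | some h => (s.1 ++ [PySem.Int.bor (h <<< 8) x], none))
      (acc, none)) = acc ++ pvPairs t := by
  induction t using pvPairs.induct with
  | case1 => intro acc; simp [pvPairs]
  | case2 a => intro acc; simp [pvPairs]
  | case3 a b t ih =>
    intro acc
    simp only [List.foldl_cons]
    exact (ih (acc ++ [PySem.Int.bor (a <<< 8) b])).trans (by simp [pvPairs])

lemma B_eq_pairs (packet : List Int) : packet_8_to_16_alt packet = pvPairs packet := by
  unfold packet_8_to_16_alt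
  have := B_loop packet []
  simpa using this

-- ===== VERDICT (by name: the statement is the Claim_ definition above) =====
theorem packet_8_to_16_spec : Claim_equal_packet_8_to_16 := by
  intro packet _
  unfold Spec_packet_8_to_16
  rw [A_eq_pairs, B_eq_pairs]
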